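-- pv_equiv track=rewrite | github.com/Kasra277/Zhoana | bot.py | _price_preset_rows
-- ===== SOURCE A (Python) =====
-- def _price_preset_rows(
--     presets: list[int], prefix: str, extra_last: dict
-- ) -> list[list[dict]]:
--     rows: list[list[dict]] = []
--     row: list[dict] = []
--     for p in presets:
--         label = f"€{p}" if p > 0 else "€0"
--         row.append({"text": label, "callback_data": f"{prefix}:{p}"})
--         if len(row) == 3:
--             rows.append(row)
--             row = []
--     if row:
--         rows.append(row)
--     rows.append([extra_last])
--     return rows
-- ===== SOURCE B (Python) =====
-- def _price_preset_rows(
--     presets: list[int], prefix: str, extra_last: dict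
-- ) -> list[list[dict]]:
--     buttons = [
--         {"text": f"\u20ac{p}" if p > 0 else "\u20ac0", "callback_data": f"{prefix}:{p}"}
--         for p in presets
--     ]
--     rows = [buttons[i:i + 3] for i in range(0, len(buttons), 3)]
--     rows.append([extra_last])
--     return rows
-- ===== Notes on version B (the rewrite author's own statement) =====
-- stated objective: simpler
-- what changed: Replaces A's incremental accumulate-and-flush-at-3 row buffer with a build-then-partition decomposition: one comprehension builds all buttons, then slice-chunking cuts them into rows of three.
import Mathlib
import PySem

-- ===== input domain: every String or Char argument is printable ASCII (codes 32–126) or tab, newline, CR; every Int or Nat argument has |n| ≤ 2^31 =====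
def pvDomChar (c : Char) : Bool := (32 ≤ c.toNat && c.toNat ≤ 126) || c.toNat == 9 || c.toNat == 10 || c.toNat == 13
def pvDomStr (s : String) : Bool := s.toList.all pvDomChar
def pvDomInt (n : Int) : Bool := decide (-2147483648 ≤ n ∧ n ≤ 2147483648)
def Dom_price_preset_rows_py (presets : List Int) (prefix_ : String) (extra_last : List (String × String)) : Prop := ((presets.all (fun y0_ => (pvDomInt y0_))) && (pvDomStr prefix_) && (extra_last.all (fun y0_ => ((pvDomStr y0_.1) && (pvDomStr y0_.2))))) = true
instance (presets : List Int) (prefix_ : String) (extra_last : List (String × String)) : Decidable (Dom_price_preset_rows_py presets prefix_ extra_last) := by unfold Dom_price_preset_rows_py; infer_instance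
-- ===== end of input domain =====

-- B replaces A's accumulate-and-flush-at-3 row buffer with a build-all-buttons-then-slice-chunk
-- decomposition (simpler); return values are proved equal on the whole domain.


-- ===== PORT A =====
-- one loop step of A: append the button to the open row; flush the row when it reaches 3
def pvStepA (prefix_ : String)
    (st : List (List (List (String × String))) × List (List (String × String))) (p : Int) :
    List (List (List (String × String))) × List (List (String × String)) :=
  let label := if p > 0 then "€" ++ PySem.Int.toStr p else "€0"
  let row := st.2 ++ [[("text", label), ("callback_data", prefix_ ++ ":" ++ PySem.Int.toStr p)]]
  if row.length = 3 then (st.1 ++ [row], []) else (st.1, row)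

def price_preset_rows_py (presets : List Int) (prefix_ : String) (extra_last : List (String × String)) : List (List (List (String × String))) :=
  let st := presets.foldl (pvStepA prefix_) ([], [])
  let rows := if st.2 ≠ [] then st.1 ++ [st.2] else st.1
  rows ++ [[extra_last]]

-- ===== PORT B =====
-- one button dict for preset p
def pvBtn (prefix_ : String) (p : Int) : List (String × String) :=
  [("text", if p > 0 then "€" ++ PySem.Int.toStr p else "€0"),
   ("callback_data", prefix_ ++ ":" ++ PySem.Int.toStr p)]

def price_preset_rows_py_alt (presets : List Int) (prefix_ : String) (extra_last : List (String × String)) : List (List (List (String × String))) :=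
  let buttons := presets.map (pvBtn prefix_)
  let rows := (PySem.List.pyRange 0 (buttons.length : Int) 3).map
      (fun i => PySem.List.slice buttons (some i) (some (i + 3)))
  rows ++ [[extra_last]]

-- ===== PRECONDITION & SPEC =====
def Spec_price_preset_rows_py (presets : List Int) (prefix_ : String) (extra_last : List (String × String)) (out : List (List (List (String × String)))) : Prop := out = price_preset_rows_py_alt presets prefix_ extra_last
instance (presets : List Int) (prefix_ : String) (extra_last : List (String × String)) (out : List (List (List (String × String)))) : Decidable (Spec_price_preset_rows_py presets prefix_ extra_last out) := by unfold Spec_price_preset_rows_py; infer_instance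

-- ===== CLAIM (what is proved, stated in full; the proofs are below) =====
def Claim_equal_price_preset_rows_py : Prop := ∀ (presets : List Int) (prefix_ : String) (extra_last : List (String × String)), Dom_price_preset_rows_py presets prefix_ extra_last → Spec_price_preset_rows_py presets prefix_ extra_last (price_preset_rows_py presets prefix_ extra_last)

-- ===== LEMMAS AND PROOFS =====

-- proof-only helper: partition a list into chunks of three
def pvChunk3 {α : Type} : List α → List (List α)
  | [] => []
  | a :: l => (a :: l.take 2) :: pvChunk3 (l.drop 2)
termination_by l => l.length
decreasing_by simp

theorem pvChunk3_nil {α : Type} : pvChunk3 ([] : List α) = [] := by simp [pvChunk3]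

theorem pvChunk3_of_ne_nil {α : Type} (l : List α) (h : l ≠ []) :
    pvChunk3 l = l.take 3 :: pvChunk3 (l.drop 3) := by
  cases l with
  | nil => exact absurd rfl h
  | cons a t => rw [pvChunk3]; simp

theorem pvChunk3_short {α : Type} (l : List α) (h : l.length < 3) :
    pvChunk3 l = if l = [] then [] else [l] := by
  cases l with
  | nil => simp [pvChunk3_nil]
  | cons a t =>
    rw [pvChunk3_of_ne_nil _ (by simp)]
    have h1 : (a :: t).take 3 = a :: t := List.take_of_length_le (by omega)
    have h2 : (a :: t).drop 3 = [] := List.drop_eq_nil_of_le (by simp at h ⊢; omega)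
    rw [h1, h2, pvChunk3_nil]
    simp

theorem pvChunk3_three {α : Type} (l rest : List α) (h : l.length = 3) :
    pvChunk3 (l ++ rest) = l :: pvChunk3 rest := by
  have hne : l ++ rest ≠ [] := by cases l <;> simp_all
  rw [pvChunk3_of_ne_nil _ hne]
  rw [show (3 : ℕ) = l.length from h.symm]
  rw [List.take_left, List.drop_left]

-- A's loop computes the chunks: invariant for the fold
theorem pvFoldA (prefix_ : String) :
    ∀ (ps : List Int) (rows : List (List (List (String × String))))
      (row : List (List (String × String))), row.length < 3 →
      (let st := ps.foldl (pvStepA prefix_) (rows, row)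
       if st.2 ≠ [] then st.1 ++ [st.2] else st.1)
        = rows ++ pvChunk3 (row ++ ps.map (pvBtn prefix_)) := by
  intro ps
  induction ps with
  | nil =>
    intro rows row hlt
    simp only [List.foldl_nil, List.map_nil, List.append_nil]
    rw [pvChunk3_short row hlt]
    by_cases h : row = [] <;> simp [h]
  | cons p ps ih =>
    intro rows row hlt
    simp only [List.foldl_cons, List.map_cons]
    have hstep : pvStepA prefix_ (rows, row) p =
        if (row ++ [pvBtn prefix_ p]).length = 3
        then (rows ++ [row ++ [pvBtn prefix_ p]], [])
        else (rows, row ++ [pvBtn prefix_ p]) := rfl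
    rw [hstep]
    by_cases h3 : (row ++ [pvBtn prefix_ p]).length = 3
    · rw [if_pos h3, ih _ _ (by simp)]
      have : row ++ pvBtn prefix_ p :: ps.map (pvBtn prefix_)
           = (row ++ [pvBtn prefix_ p]) ++ ps.map (pvBtn prefix_) := by simp
      rw [this, pvChunk3_three _ _ h3]
      simp
    · rw [if_neg h3]
      have hlen : (row ++ [pvBtn prefix_ p]).length < 3 := by
        simp only [List.length_append, List.length_cons, List.length_nil] at h3 ⊢
        omega
      rw [ih _ _ hlen]
      simp

-- B's slice-chunking over range(0, n, 3) is pvChunk3 (Nat.range form first)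
theorem pvRangeChunk {α : Type} :
    ∀ (m : ℕ) (l : List α), m = (l.length + 2) / 3 →
      (List.range m).map (fun k => (l.drop (3 * k)).take 3) = pvChunk3 l := by
  intro m
  induction m with
  | zero =>
    intro l hm
    have : l.length = 0 := by omega
    rw [List.length_eq_zero_iff] at this
    subst this
    simp [pvChunk3_nil]
  | succ m ih =>
    intro l hm
    have hne : l ≠ [] := by
      intro h; subst h; simp only [List.length_nil] at hm; omega
    rw [List.range_succ_eq_map, List.map_cons, List.map_map]
    rw [pvChunk3_of_ne_nil _ hne]
    simp only [Nat.mul_zero, List.drop_zero]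
    congr 1
    have heq : (fun k => (l.drop (3 * k)).take 3) ∘ Nat.succ
        = (fun k => ((l.drop 3).drop (3 * k)).take 3) := by
      funext k
      simp only [Function.comp]
      rw [List.drop_drop]
      congr 2
      omega
    rw [heq]
    apply ih
    have : (l.drop 3).length = l.length - 3 := by simp
    omega

theorem pvSliceChunk {α : Type} (l : List α) :
    (PySem.List.pyRange 0 (l.length : Int) 3).map
        (fun i => PySem.List.slice l (some i) (some (i + 3)))
      = pvChunk3 l := by
  rw [PySem.List.pyRange_of_pos 0 (l.length : Int) (by norm_num), List.map_map]
  have hcnt : (if (0 : Int) < (l.length : Int)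
      then (((l.length : Int) - 0 + 3 - 1) / 3).toNat else 0) = (l.length + 2) / 3 := by
    split_ifs with h <;> omega
  rw [hcnt]
  rw [← pvRangeChunk ((l.length + 2) / 3) l rfl]
  apply List.map_congr_left
  intro k _
  simp only [Function.comp]
  have h1 : (0 : Int) + 3 * (k : Int) = ((3 * k : ℕ) : Int) := by push_cast; ring
  have h2 : ((3 * k : ℕ) : Int) + 3 = ((3 * k + 3 : ℕ) : Int) := by push_cast; ring
  rw [h1, h2, PySem.List.slice_natCast]
  congr 1
  omega

-- ===== VERDICT (by name: the statement is the Claim_ definition above) =====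
theorem price_preset_rows_py_spec : Claim_equal_price_preset_rows_py := by
  intro presets prefix_ extra_last _
  unfold Spec_price_preset_rows_py price_preset_rows_py price_preset_rows_py_alt
  have hA := pvFoldA prefix_ presets [] [] (by simp)
  simp only [List.nil_append] at hA
  simp only [hA, pvSliceChunk]
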